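-- pv_equiv track=rewrite | github.com/eliottcassidy2000/math | 04-computation/real_roots_n9.py | has_claw
-- ===== SOURCE A (Python) =====
-- def has_claw(adj):
--     """Check if graph has K_{1,3} (claw) as induced subgraph."""
--     m = len(adj)
--     for v in range(m):
--         # Find non-neighbors of v
--         non_nbrs = [u for u in range(m) if u != v and not adj[v][u]]
--         # Need 3 pairwise non-adjacent non-neighbors of v
--         # But wait, claw = v adjacent to 3 vertices that are pairwise NON-adjacent
--         nbrs = [u for u in range(m) if u != v and adj[v][u]]
--         if len(nbrs) < 3:
--             continue
--         for i in range(len(nbrs)):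
--             for j in range(i+1, len(nbrs)):
--                 for k in range(j+1, len(nbrs)):
--                     a, b, c = nbrs[i], nbrs[j], nbrs[k]
--                     if not adj[a][b] and not adj[a][c] and not adj[b][c]:
--                         return True
--     return False
-- ===== SOURCE B (Python) =====
-- def has_claw(adj):
--     """Check if graph has K_{1,3} (claw) as induced subgraph.
--
--     Bitset formulation: one mask per row; for each centre v and each
--     non-adjacent pair (a, b) of neighbours of v, the third leg c is
--     found by a single AND of masks instead of a scanning loop.
--     """
--     m = len(adj)
--     full = (1 << m) - 1
--     masks = [sum(1 << u for u, x in enumerate(row) if x) for row in adj]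
--     for v in range(m):
--         nb = masks[v] & (full ^ 1 << v)  # neighbours of v among 0..m-1, bit v cleared
--         for a in range(m):
--             if nb >> a & 1 == 0:
--                 continue
--             # neighbours of v above a that are non-adjacent to a
--             cand_a = (nb >> (a + 1) << (a + 1)) & (full ^ masks[a])
--             for b in range(a + 1, m):
--                 if cand_a >> b & 1 == 0:
--                     continue
--                 if cand_a >> (b + 1) << (b + 1) & (full ^ masks[b]):
--                     return True
--     return False
-- ===== Notes on version B (the rewrite author's own statement) =====
-- stated objective: alternative
-- what changed: Replaces the per-vertex cubic triple loop over neighbour indices by per-row bitmasks: for each centre v and each non-adjacent neighbour pair (a,b) the third leg c is found by one AND of word-packed masks tested against zero, removing the innermost scan.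
import Mathlib
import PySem

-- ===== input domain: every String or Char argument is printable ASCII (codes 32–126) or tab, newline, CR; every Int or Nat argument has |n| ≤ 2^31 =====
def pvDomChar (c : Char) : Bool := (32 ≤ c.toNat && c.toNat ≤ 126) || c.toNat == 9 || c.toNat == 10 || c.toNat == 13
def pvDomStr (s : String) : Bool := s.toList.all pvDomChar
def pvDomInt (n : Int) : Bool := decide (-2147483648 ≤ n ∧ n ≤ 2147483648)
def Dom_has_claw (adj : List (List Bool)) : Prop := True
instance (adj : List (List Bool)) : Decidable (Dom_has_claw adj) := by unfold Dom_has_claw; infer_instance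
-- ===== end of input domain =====

-- B replaces A's cubic triple loop over neighbour indices by per-row bitmasks: the third claw leg
-- is found with a single AND of masks tested against zero (objective: alternative algorithm).

-- ===== PORT A =====
def has_claw (adj : List (List Bool)) : Bool :=
  let m := PySem.List.len adj
  (PySem.List.pyRange 0 m 1).any (fun v =>
    let _non_nbrs := (PySem.List.pyRange 0 m 1).filter (fun u =>
      u != v && !(PySem.List.pyGetD (PySem.List.pyGetD adj v []) u false))
    let nbrs := (PySem.List.pyRange 0 m 1).filter (fun u =>
      u != v && PySem.List.pyGetD (PySem.List.pyGetD adj v []) u false)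
    if nbrs.length < 3 then false
    else
      (PySem.List.pyRange 0 (PySem.List.len nbrs) 1).any (fun i =>
        (PySem.List.pyRange (i + 1) (PySem.List.len nbrs) 1).any (fun j =>
          (PySem.List.pyRange (j + 1) (PySem.List.len nbrs) 1).any (fun k =>
            let a := PySem.List.pyGetD nbrs i 0
            let b := PySem.List.pyGetD nbrs j 0
            let c := PySem.List.pyGetD nbrs k 0
            !(PySem.List.pyGetD (PySem.List.pyGetD adj a []) b false) &&
              (!(PySem.List.pyGetD (PySem.List.pyGetD adj a []) c false) &&
                !(PySem.List.pyGetD (PySem.List.pyGetD adj b []) c false))))))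

-- ===== PORT B =====
-- sum(1 << u for u, x in enumerate(row) if x); enumerate indices are the non-negative
-- Python ints 0,1,2,..., so `1 << u` is ported through .toNat
def altMask (row : List Bool) : Nat :=
  (PySem.List.enumerate row 0).foldl (fun s ux => if ux.2 then s + (1 <<< ux.1.toNat) else s) 0

def has_claw_alt (adj : List (List Bool)) : Bool :=
  let m := adj.length
  let full := (1 <<< m) - 1
  let masks := adj.map (fun row => altMask row)
  (List.range m).any (fun v =>
    let nb := masks.getD v 0 &&& (full ^^^ (1 <<< v))
    (List.range m).any (fun a =>
      if (nb >>> a) &&& 1 == 0 then false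
      else
        let candA := ((nb >>> (a + 1)) <<< (a + 1)) &&& (full ^^^ masks.getD a 0)
        (List.range' (a + 1) (m - (a + 1))).any (fun b =>
          if (candA >>> b) &&& 1 == 0 then false
          else (((candA >>> (b + 1)) <<< (b + 1)) &&& (full ^^^ masks.getD b 0)) != 0)))

-- ===== PRECONDITION & SPEC =====
-- Pre_ admits exactly the shapes A's index reads accept: every row at least len(adj) long,
-- except that a final row may be short by exactly its diagonal entry (which A never reads).
-- Outside Pre_ A raises IndexError while reading adj[v][u] (or, having found a claw earlier,
-- may still return True; see the cite in the claim).
def Pre_has_claw (adj : List (List Bool)) : Prop :=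
  ∀ (i : Nat) (h : i < adj.length),
    adj.length ≤ adj[i].length ∨ (adj[i].length + 1 = adj.length ∧ i + 1 = adj.length)
instance (adj : List (List Bool)) : Decidable (Pre_has_claw adj) := by unfold Pre_has_claw; infer_instance
def pvWitness_has_claw : List (List Bool) :=
  [[false, true, true, true], [true, false, false, false],
   [true, false, false, false], [true, false, false, false]]
def Spec_has_claw (adj : List (List Bool)) (out : Bool) : Prop := out = has_claw_alt adj
instance (adj : List (List Bool)) (out : Bool) : Decidable (Spec_has_claw adj out) := by unfold Spec_has_claw; infer_instance

-- ===== CLAIM (what is proved, stated in full; the proofs are below) =====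
def Claim_equal_has_claw : Prop := ∀ (adj : List (List Bool)), Dom_has_claw adj → Pre_has_claw adj → Spec_has_claw adj (has_claw adj)

-- ===== LEMMAS AND PROOFS =====

-- adjacency read with defaults, as both total ports perform it
def pvAdjB (adj : List (List Bool)) (x y : Nat) : Bool := (adj.getD x []).getD y false

-- the common characterisation both ports decide
def ClawWitness (adj : List (List Bool)) (v a b c : Nat) : Prop :=
  v < adj.length ∧ a < b ∧ b < c ∧ c < adj.length ∧
  a ≠ v ∧ b ≠ v ∧ c ≠ v ∧
  pvAdjB adj v a = true ∧ pvAdjB adj v b = true ∧ pvAdjB adj v c = true ∧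
  pvAdjB adj a b = false ∧ pvAdjB adj a c = false ∧ pvAdjB adj b c = false

def HasClawP (adj : List (List Bool)) : Prop := ∃ v a b c, ClawWitness adj v a b c

-- the neighbour list A builds for centre v, in Nat form
def natN (adj : List (List Bool)) (v : Nat) : List Nat :=
  (List.range adj.length).filter (fun u => u != v && pvAdjB adj v u)

theorem mem_natN (adj : List (List Bool)) (v u : Nat) :
    u ∈ natN adj v ↔ u < adj.length ∧ u ≠ v ∧ pvAdjB adj v u = true := by
  simp [natN, List.mem_filter, List.mem_range]

theorem natN_pairwise (adj : List (List Bool)) (v : Nat) : (natN adj v).Pairwise (· < ·) :=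
  List.Pairwise.sublist List.filter_sublist List.pairwise_lt_range

theorem idx_lt_of_pairwise {l : List Nat} (hp : l.Pairwise (· < ·)) {i j : Nat}
    (hi : i < l.length) (hj : j < l.length) (hab : l[i] < l[j]) : i < j := by
  by_contra h
  push_neg at h
  rcases Nat.eq_or_lt_of_le h with he | hl
  · subst he; exact lt_irrefl _ hab
  · have := (List.pairwise_iff_getElem.mp hp) j i hj hi hl
    omega

theorem nbrs_eq (adj : List (List Bool)) (v : Nat) :
    List.filter (fun u => u != (v:Int) && PySem.List.pyGetD (adj.getD v []) u false)
      (List.map (Nat.cast : Nat → Int) (List.range adj.length))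
    = (natN adj v).map (Nat.cast : Nat → Int) := by
  rw [List.filter_map]
  unfold natN
  congr 1
  apply List.filter_congr
  intro u _
  simp only [Function.comp_apply]
  by_cases h : u = v
  · simp [h, pvAdjB]
  · have h' : (u : Int) ≠ (v : Int) := by exact_mod_cast h
    have e1 : ((u:Int) != (v:Int)) = true := by simpa using h'
    have e2 : (u != v) = true := by simpa using h
    rw [e1, e2]
    simp [pvAdjB]

theorem getD_map_cast (l : List Nat) (n : Nat) (h : n < l.length) :
    (l.map (Nat.cast : Nat → Int)).getD n 0 = ((l[n] : Nat) : Int) := by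
  rw [List.getD_eq_getElem _ _ (by simpa using h), List.getElem_map]

theorem A_iff (adj : List (List Bool)) : has_claw adj = true ↔ HasClawP adj := by
  unfold has_claw
  simp only [PySem.List.len_eq, PySem.List.pyRange_zero_natCast, List.any_map, Function.comp,
    List.any_eq_true, List.mem_range, nbrs_eq, List.length_map, PySem.List.pyGetD_natCast]
  constructor
  · rintro ⟨v, hv, hbody⟩
    by_cases hL : (natN adj v).length < 3
    · rw [if_pos hL] at hbody; exact absurd hbody (by simp)
    · rw [if_neg hL] at hbody
      simp only [Function.comp, List.any_eq_true, List.mem_range, PySem.List.mem_pyRange_one] at hbody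
      obtain ⟨i, hi, j, hj, k, hk, h3⟩ := hbody
      obtain ⟨jn, rfl⟩ : ∃ jn : Nat, j = (jn : Int) :=
        ⟨j.toNat, (Int.toNat_of_nonneg (by omega)).symm⟩
      obtain ⟨kn, rfl⟩ : ∃ kn : Nat, k = (kn : Int) :=
        ⟨k.toNat, (Int.toNat_of_nonneg (by omega)).symm⟩
      simp only [PySem.List.pyGetD_natCast] at h3
      have hij : i < jn := by omega
      have hjk : jn < kn := by omega
      rw [getD_map_cast _ i (by omega), getD_map_cast _ jn (by omega),
          getD_map_cast _ kn (by omega)] at h3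
      simp only [PySem.List.pyGetD_natCast, Bool.and_eq_true, Bool.not_eq_true'] at h3
      have hpw := natN_pairwise adj v
      have hma := (mem_natN adj v _).mp (List.getElem_mem (l := natN adj v) (n := i) (by omega))
      have hmb := (mem_natN adj v _).mp (List.getElem_mem (l := natN adj v) (n := jn) (by omega))
      have hmc := (mem_natN adj v _).mp (List.getElem_mem (l := natN adj v) (n := kn) (by omega))
      refine ⟨v, (natN adj v)[i], (natN adj v)[jn], (natN adj v)[kn],
        hv, ?_, ?_, hmc.1, hma.2.1, hmb.2.1, hmc.2.1, hma.2.2, hmb.2.2, hmc.2.2, ?_, ?_, ?_⟩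
      · exact List.pairwise_iff_getElem.mp hpw i jn (by omega) (by omega) hij
      · exact List.pairwise_iff_getElem.mp hpw jn kn (by omega) (by omega) hjk
      · simpa [pvAdjB] using h3.1
      · simpa [pvAdjB] using h3.2.1
      · simpa [pvAdjB] using h3.2.2
  · rintro ⟨v, a, b, c, hv, hab, hbc, hcm, hav, hbv, hcv, hva, hvb, hvc, hnab, hnac, hnbc⟩
    refine ⟨v, hv, ?_⟩
    have ham : a ∈ natN adj v := (mem_natN adj v a).mpr ⟨by omega, hav, hva⟩
    have hbm : b ∈ natN adj v := (mem_natN adj v b).mpr ⟨by omega, hbv, hvb⟩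
    have hcm' : c ∈ natN adj v := (mem_natN adj v c).mpr ⟨hcm, hcv, hvc⟩
    obtain ⟨ia, hia, hae⟩ := List.mem_iff_getElem.mp ham
    obtain ⟨ib, hib, hbe⟩ := List.mem_iff_getElem.mp hbm
    obtain ⟨ic, hic, hce⟩ := List.mem_iff_getElem.mp hcm'
    have hpw := natN_pairwise adj v
    have h1 : ia < ib := idx_lt_of_pairwise hpw hia hib (by rw [hae, hbe]; exact hab)
    have h2 : ib < ic := idx_lt_of_pairwise hpw hib hic (by rw [hbe, hce]; exact hbc)
    rw [if_neg (by omega)]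
    simp only [Function.comp, List.any_eq_true, List.mem_range, PySem.List.mem_pyRange_one]
    refine ⟨ia, by omega, (ib : Int), by omega, (ic : Int), by omega, ?_⟩
    simp only [PySem.List.pyGetD_natCast]
    rw [getD_map_cast _ ia hia, getD_map_cast _ ib hib, getD_map_cast _ ic hic,
        hae, hbe, hce]
    simp only [PySem.List.pyGetD_natCast]
    simp only [pvAdjB, List.getD_eq_getElem?_getD] at hnab hnac hnbc
    simp [hnab, hnac, hnbc]

theorem altMask_snoc (l : List Bool) (x : Bool) :
    altMask (l ++ [x]) = if x then altMask l + (1 <<< l.length) else altMask l := by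
  unfold altMask
  rw [PySem.List.enumerate_append, List.foldl_append]
  simp [PySem.List.enumerate_cons, PySem.List.enumerate_nil]

theorem altMask_lt (row : List Bool) : altMask row < 2 ^ row.length := by
  induction row using List.reverseRecOn with
  | nil => simp [altMask, PySem.List.enumerate_nil]
  | append_singleton l x ih =>
    rw [altMask_snoc, Nat.one_shiftLeft]
    have h2 : (2:Nat) ^ (l ++ [x]).length = 2 ^ l.length + 2 ^ l.length := by
      simp [List.length_append]
      ring
    split <;> omega

theorem altMask_testBit (row : List Bool) (u : Nat) :
    (altMask row).testBit u = row.getD u false := by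
  induction row using List.reverseRecOn with
  | nil => simp [altMask, PySem.List.enumerate_nil]
  | append_singleton l x ih =>
    have hlt := altMask_lt l
    rw [altMask_snoc, Nat.one_shiftLeft]
    by_cases hx : x = true
    · rw [if_pos hx]
      rcases Nat.lt_trichotomy u l.length with h | h | h
      · rw [Nat.add_comm, Nat.testBit_two_pow_add_gt h, ih,
            List.getD_eq_getElem?_getD, List.getD_eq_getElem?_getD,
            List.getElem?_append_left h]
      · subst h
        rw [Nat.add_comm, Nat.testBit_two_pow_add_eq, Nat.testBit_eq_false_of_lt hlt]
        simp [List.getD_eq_getElem?_getD, List.getElem?_append_right (le_refl _), hx]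
      · have hb : altMask l + 2 ^ l.length < 2 ^ u := by
          have h2 : (2:Nat) ^ (l.length + 1) ≤ 2 ^ u := Nat.pow_le_pow_right (by norm_num) h
          have h3 : (2:Nat) ^ (l.length + 1) = 2 ^ l.length + 2 ^ l.length := by ring
          omega
        rw [Nat.testBit_eq_false_of_lt hb]
        have hn : (l ++ [x])[u]? = none := List.getElem?_eq_none (by simp; omega)
        simp [List.getD_eq_getElem?_getD, hn]
    · rw [if_neg hx]
      have hx' : x = false := by simpa using hx
      subst hx'
      rcases Nat.lt_trichotomy u l.length with h | h | h
      · rw [ih, List.getD_eq_getElem?_getD, List.getD_eq_getElem?_getD,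
            List.getElem?_append_left h]
      · subst h
        rw [Nat.testBit_eq_false_of_lt hlt]
        simp [List.getD_eq_getElem?_getD, List.getElem?_append_right (le_refl _)]
      · have hb : altMask l < 2 ^ u :=
          lt_of_lt_of_le hlt (Nat.pow_le_pow_right (by norm_num) (le_of_lt h))
        rw [Nat.testBit_eq_false_of_lt hb]
        have hn : (l ++ [false])[u]? = none := List.getElem?_eq_none (by simp; omega)
        simp [List.getD_eq_getElem?_getD, hn]

theorem masks_getD (adj : List (List Bool)) (x : Nat) (hx : x < adj.length) :
    (adj.map (fun row => altMask row)).getD x 0 = altMask (adj.getD x []) := by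
  rw [List.getD_eq_getElem _ _ (by simpa using hx), List.getElem_map,
      List.getD_eq_getElem _ _ hx]

theorem testBit_guard (x i : Nat) : (((x >>> i) &&& 1) == 0) = !x.testBit i := by
  unfold Nat.testBit
  rw [Nat.and_comm 1 (x >>> i)]
  simp [bne]

theorem nb_testBit (adj : List (List Bool)) (v u : Nat) (hv : v < adj.length) :
    ((adj.map (fun row => altMask row)).getD v 0 &&& (((1 <<< adj.length) - 1) ^^^ (1 <<< v))).testBit u
      = (decide (u < adj.length) && (decide (u ≠ v) && pvAdjB adj v u)) := by
  rw [Nat.testBit_and, masks_getD adj v hv, altMask_testBit]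
  simp only [Nat.one_shiftLeft]
  rw [Nat.testBit_xor, Nat.testBit_two_pow_sub_one, Nat.testBit_two_pow]
  by_cases h : v = u
  · subst h
    simp [hv, pvAdjB]
  · simp [h, Ne.symm h, pvAdjB, Bool.and_comm]

theorem shift_window_testBit (x i t : Nat) :
    (((x >>> i) <<< i).testBit t) = (decide (i ≤ t) && x.testBit t) := by
  rw [Nat.testBit_shiftLeft, Nat.testBit_shiftRight]
  by_cases h : i ≤ t
  · simp [h, Nat.add_sub_cancel' h]
  · simp [h]

theorem window_testBit (adj : List (List Bool)) (y : Nat) (x i t : Nat) (hx : x < adj.length)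
    (hy : y.testBit t = true → t < adj.length) :
    (((y >>> i) <<< i) &&& (((1 <<< adj.length) - 1) ^^^ (adj.map (fun row => altMask row)).getD x 0)).testBit t
      = (decide (i ≤ t) && (y.testBit t && !pvAdjB adj x t)) := by
  rw [Nat.testBit_and, shift_window_testBit, masks_getD adj x hx, Nat.one_shiftLeft,
      Nat.testBit_xor, Nat.testBit_two_pow_sub_one, altMask_testBit]
  cases hyt : y.testBit t
  · simp
  · have htm := hy hyt
    simp [htm, pvAdjB]

theorem exists_testBit_of_ne_zero {x : Nat} (h : x ≠ 0) : ∃ i, x.testBit i = true := by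
  by_contra hc
  push_neg at hc
  exact h (Nat.zero_of_testBit_eq_false (by simpa using hc))

theorem nb_bound (adj : List (List Bool)) (v : Nat) (hv : v < adj.length) :
    ∀ t : Nat, ((adj.map (fun row => altMask row)).getD v 0 &&&
      (((1 <<< adj.length) - 1) ^^^ (1 <<< v))).testBit t = true → t < adj.length := by
  intro t ht
  rw [nb_testBit adj v t hv] at ht
  simp at ht
  exact ht.1

theorem window_bound (adj : List (List Bool)) (y x i : Nat) (hx : x < adj.length)
    (hy : ∀ t : Nat, y.testBit t = true → t < adj.length) :
    ∀ t : Nat, (((y >>> i) <<< i) &&&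
      (((1 <<< adj.length) - 1) ^^^ (adj.map (fun row => altMask row)).getD x 0)).testBit t = true →
      t < adj.length := by
  intro t ht
  rw [window_testBit adj y x i t hx (hy t)] at ht
  simp at ht
  exact hy t ht.2.1

theorem B_iff (adj : List (List Bool)) : has_claw_alt adj = true ↔ HasClawP adj := by
  unfold has_claw_alt
  simp only [List.any_eq_true, List.mem_range]
  constructor
  · rintro ⟨v, hv, a, ha, h2⟩
    have hynb := nb_bound adj v hv
    split at h2
    · exact absurd h2 (by simp)
    next hguard =>
      rw [testBit_guard, nb_testBit adj v a hv] at hguard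
      simp at hguard
      obtain ⟨haL, hav, hva⟩ := hguard
      rw [List.any_eq_true] at h2
      obtain ⟨b, hbm, h3⟩ := h2
      rw [List.mem_range'_1] at hbm
      have hbL : b < adj.length := by omega
      split at h3
      · exact absurd h3 (by simp)
      next hgb =>
        rw [testBit_guard, window_testBit adj _ a (a + 1) b ha (hynb b),
            nb_testBit adj v b hv] at hgb
        simp at hgb
        obtain ⟨hab1, ⟨hbL2, hbv, hvb⟩, hnab⟩ := hgb
        rw [bne_iff_ne] at h3
        obtain ⟨c, hc⟩ := exists_testBit_of_ne_zero h3
        rw [window_testBit adj _ b (b + 1) c hbL (window_bound adj _ a (a + 1) ha hynb c),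
            window_testBit adj _ a (a + 1) c ha (hynb c),
            nb_testBit adj v c hv] at hc
        simp at hc
        obtain ⟨hbc1, ⟨hac1, ⟨hcL, hcv, hvc⟩, hnac⟩, hnbc⟩ := hc
        exact ⟨v, a, b, c, hv, by omega, by omega, hcL, hav, hbv, hcv, hva, hvb, hvc,
          hnab, hnac, hnbc⟩
  · rintro ⟨v, a, b, c, hv, hab, hbc, hcm, hav, hbv, hcv, hva, hvb, hvc, hnab, hnac, hnbc⟩
    have ha : a < adj.length := by omega
    have hb : b < adj.length := by omega
    have hynb := nb_bound adj v hv
    refine ⟨v, hv, a, ha, ?_⟩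
    rw [testBit_guard, nb_testBit adj v a hv, if_neg (by simp [ha, hav, hva])]
    rw [List.any_eq_true]
    refine ⟨b, by rw [List.mem_range'_1]; omega, ?_⟩
    rw [testBit_guard, window_testBit adj _ a (a + 1) b ha (hynb b), nb_testBit adj v b hv,
        if_neg (by simp [show a + 1 ≤ b by omega, hb, hbv, hvb, hnab])]
    rw [bne_iff_ne]
    intro h0
    have hXc := congrArg (fun t => Nat.testBit t c) h0
    simp only [Nat.zero_testBit] at hXc
    rw [window_testBit adj _ b (b + 1) c hb (window_bound adj _ a (a + 1) ha hynb c),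
        window_testBit adj _ a (a + 1) c ha (hynb c),
        nb_testBit adj v c hv] at hXc
    simp [show b + 1 ≤ c by omega, show a + 1 ≤ c by omega, hcm, hcv, hvc, hnac, hnbc] at hXc

-- ===== VERDICT (by name: the statement is the Claim_ definition above) =====
theorem has_claw_spec : Claim_equal_has_claw := by
  intro adj _ _
  unfold Spec_has_claw
  exact Bool.eq_iff_iff.mpr ((A_iff adj).trans (B_iff adj).symm)
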